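-- pv_equiv track=rewrite | github.com/sarbuland-dev/python-basic-problems- | programin_task.py/Q11.py | max_consonant_word
-- ===== SOURCE A (Python) =====
-- def max_consonant_word(sentence):
--     vowels = "aeiouAEIOU"
--     words = sentence.split()
--     max_word = ""
--     max_count = 0
--
--     for word in words:
--         count = 0
--         for ch in word:
--             if ch.isalpha() and ch not in vowels:
--                 count += 1
--         if count > max_count:
--             max_count = count
--             max_word = word
--
--     return max_word, max_count
-- ===== SOURCE B (Python) =====
-- def max_consonant_word(sentence):
--     # Staged computation: materialise the per-word consonant counts, take the
--     # global maximum, then look up the first word attaining it.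
--     vowels = "aeiouAEIOU"
--     words = sentence.split()
--     counts = [sum(ch.isalpha() and ch not in vowels for ch in w) for w in words]
--     best = max(counts, default=0)
--     if best == 0:
--         return ("", 0)
--     return (words[counts.index(best)], best)
-- ===== Notes on version B (the rewrite author's own statement) =====
-- stated objective: alternative
-- what changed: Replaces A's single-pass best-word/best-count accumulator with a staged pipeline: build the list of per-word consonant counts, take its global max (default 0), and index the first word attaining it; an explicit guard returns ("", 0) when the best count is 0.
import Mathlib
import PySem

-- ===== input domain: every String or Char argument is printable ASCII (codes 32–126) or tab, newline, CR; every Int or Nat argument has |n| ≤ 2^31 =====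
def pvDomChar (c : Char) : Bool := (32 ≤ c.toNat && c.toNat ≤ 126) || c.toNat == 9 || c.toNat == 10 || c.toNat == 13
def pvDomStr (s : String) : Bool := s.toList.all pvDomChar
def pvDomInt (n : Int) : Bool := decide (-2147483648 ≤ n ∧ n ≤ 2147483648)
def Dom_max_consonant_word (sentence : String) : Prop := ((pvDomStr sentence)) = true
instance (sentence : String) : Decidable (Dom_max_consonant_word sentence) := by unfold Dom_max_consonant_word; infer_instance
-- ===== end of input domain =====

-- B replaces A's single-pass best-word/best-count accumulator with a staged pipeline
-- (counts list, global max with default 0, first index of the max): alternative decomposition.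

-- ===== PORT A =====
def pvVowels : List Char := "aeiouAEIOU".toList

-- 'ch.isalpha() and ch not in vowels' for a single character: list membership on the vowel string
def pvIsCons (ch : Char) : Bool := PySem.Chars.isalpha ch && !(pvVowels.contains ch)

-- A's inner loop: count = 0; for ch in word: if …: count += 1
def pvCountA (w : List Char) : Int :=
  w.foldl (fun count ch => if pvIsCons ch then count + 1 else count) 0

def max_consonant_word (sentence : String) : String × Int :=
  let words := PySem.Chars.split₀ sentence.toList
  let r := words.foldl (fun (acc : List Char × Int) w =>
      let count := pvCountA w
      if count > acc.2 then (w, count) else acc) ([], 0)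
  (String.ofList r.1, r.2)

-- ===== PORT B =====
-- sum(ch.isalpha() and ch not in vowels for ch in w): a sum of 0/1 terms
def pvConsB (w : List Char) : Int :=
  (w.map (fun ch => if pvIsCons ch then (1 : Int) else 0)).sum

def max_consonant_word_alt (sentence : String) : String × Int :=
  let words := PySem.Chars.split₀ sentence.toList
  let counts := words.map pvConsB
  let best := PySem.List.maxD counts (fun x => x) 0
  if best == 0 then ("", 0)
  else
    match PySem.List.index? counts best with
    | some i => (String.ofList (words.getD i []), best)
        -- counts.index(best) < counts.length = words.length, so getD is exact here
    | none => ("", 0)  -- unreachable: best ≠ 0 implies best ∈ counts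

-- ===== PRECONDITION & SPEC =====
def Spec_max_consonant_word (sentence : String) (out : String × Int) : Prop := out = max_consonant_word_alt sentence
instance (sentence : String) (out : String × Int) : Decidable (Spec_max_consonant_word sentence out) := by unfold Spec_max_consonant_word; infer_instance

-- ===== CLAIM (what is proved, stated in full; the proofs are below) =====
def Claim_equal_max_consonant_word : Prop := ∀ (sentence : String), Dom_max_consonant_word sentence → Spec_max_consonant_word sentence (max_consonant_word sentence)

-- ===== LEMMAS AND PROOFS =====

-- A's counting loop computes B's 0/1 sum
theorem countA_eq (w : List Char) : pvCountA w = pvConsB w := by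
  have h : ∀ (l : List Char) (a : Int),
      l.foldl (fun count ch => if pvIsCons ch then count + 1 else count) a
        = a + (l.map (fun ch => if pvIsCons ch then (1 : Int) else 0)).sum := by
    intro l
    induction l with
    | nil => intro a; simp
    | cons c cs ih =>
      intro a
      by_cases hc : pvIsCons c <;> (simp [List.foldl, hc, ih]; try ring)
  simpa [pvCountA, pvConsB] using h w 0

theorem consB_nonneg (w : List Char) : 0 ≤ pvConsB w := by
  refine List.sum_nonneg ?_
  intro x hx
  rcases List.mem_map.mp hx with ⟨c, _, rfl⟩
  split_ifs <;> norm_num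

-- A's fold, characterised by the staged data B computes: the running max of the
-- counts and the first index attaining it
theorem foldA_key : ∀ (ws : List (List Char)) (b : List Char) (c : Int),
    ws.foldl (fun (acc : List Char × Int) w =>
        let count := pvCountA w
        if count > acc.2 then (w, count) else acc) (b, c)
      = (let counts := ws.map pvConsB
         let best := counts.foldl max c
         if best ≤ c then (b, c)
         else match PySem.List.index? counts best with
              | some i => (ws.getD i [], best)
              | none => (b, c)) := by
  intro ws
  induction ws with
  | nil => intro b c; simp
  | cons w t ih =>
    intro b c
    simp only [List.foldl, List.map, countA_eq] at ih ⊢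
    by_cases h : pvConsB w > c
    · rw [if_pos h, ih w (pvConsB w)]
      have hmc : max c (pvConsB w) = pvConsB w := max_eq_right (le_of_lt h)
      have hle := (PySem.List.le_foldl_max (t.map pvConsB) (pvConsB w)).1
      simp only [hmc]
      by_cases hb : (t.map pvConsB).foldl max (pvConsB w) ≤ pvConsB w
      · -- the head is the maximum: index 0
        have hbe : (t.map pvConsB).foldl max (pvConsB w) = pvConsB w := le_antisymm hb hle
        rw [if_pos hb, hbe, if_neg (not_le.mpr h), PySem.List.index?_cons_self]
        simp
      · rw [if_neg hb, if_neg (not_le.mpr (lt_trans h (not_le.mp hb)))]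
        have hne : pvConsB w ≠ (t.map pvConsB).foldl max (pvConsB w) :=
          ne_of_lt (not_le.mp hb)
        rw [PySem.List.index?_cons_of_ne _ hne]
        cases hi : PySem.List.index? (t.map pvConsB) ((t.map pvConsB).foldl max (pvConsB w)) with
        | none =>
          exfalso
          have hmem : (t.map pvConsB).foldl max (pvConsB w) ∈ t.map pvConsB := by
            rcases PySem.List.foldl_max_mem (t.map pvConsB) (pvConsB w) with he | hm
            · exact absurd he.symm (ne_of_lt (not_le.mp hb))
            · exact hm
          exact ((PySem.List.index?_eq_none_iff _ _).mp hi) hmem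
        | some i => simp
    · rw [if_neg h, ih b c]
      have hmc : max c (pvConsB w) = c := max_eq_left (not_lt.mp h)
      simp only [hmc]
      by_cases hb : (t.map pvConsB).foldl max c ≤ c
      · rw [if_pos hb, if_pos hb]
      · rw [if_neg hb, if_neg hb]
        have hgt : c < (t.map pvConsB).foldl max c := not_le.mp hb
        have hne : pvConsB w ≠ (t.map pvConsB).foldl max c :=
          ne_of_lt (lt_of_le_of_lt (not_lt.mp h) hgt)
        rw [PySem.List.index?_cons_of_ne _ hne]
        cases hi : PySem.List.index? (t.map pvConsB) ((t.map pvConsB).foldl max c) with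
        | none =>
          exfalso
          have hmem : (t.map pvConsB).foldl max c ∈ t.map pvConsB := by
            rcases PySem.List.foldl_max_mem (t.map pvConsB) c with he | hm
            · exact absurd he.symm (ne_of_lt hgt)
            · exact hm
          exact ((PySem.List.index?_eq_none_iff _ _).mp hi) hmem
        | some i => simp

-- max(counts, default=0) equals the running max from 0 when all counts are nonneg
theorem maxD_eq_foldl (l : List Int) (h : ∀ x ∈ l, 0 ≤ x) :
    PySem.List.maxD l (fun x => x) 0 = l.foldl max 0 := by
  cases l with
  | nil => simp [PySem.List.maxD, PySem.List.max?]
  | cons x t =>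
    have hx : max 0 x = x := max_eq_right (h x (by simp))
    have : PySem.List.maxD (x :: t) (fun y => y) 0 = t.foldl max x := by
      simp [PySem.List.maxD, PySem.List.max?_id_cons]
    rw [this, List.foldl, hx]

-- ===== VERDICT (by name: the statement is the Claim_ definition above) =====
theorem max_consonant_word_spec : Claim_equal_max_consonant_word := by
  intro sentence _
  unfold Spec_max_consonant_word
  simp only [max_consonant_word, max_consonant_word_alt, foldA_key]
  set ws := PySem.Chars.split₀ sentence.toList with hws
  have hnn : ∀ x ∈ ws.map pvConsB, 0 ≤ x := by
    intro x hx
    rcases List.mem_map.mp hx with ⟨w, _, rfl⟩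
    exact consB_nonneg w
  rw [maxD_eq_foldl _ hnn]
  set best := (ws.map pvConsB).foldl max 0 with hbest
  have hb0 : 0 ≤ best := (PySem.List.le_foldl_max (ws.map pvConsB) 0).1
  by_cases hz : best ≤ 0
  · have : best = 0 := le_antisymm hz hb0
    simp [this]
  · have hne : ¬ (best == 0) = true := by
      simp only [beq_iff_eq]
      omega
    rw [if_neg hz, if_neg hne]
    cases hidx : PySem.List.index? (ws.map pvConsB) best with
    | none => rfl
    | some i => rfl
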